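-- pv_equiv track=rewrite | github.com/edoardottt/programming-fundamentals | Exercises/exercise23.py | valley2
-- ===== SOURCE A (Python) =====
-- def valley2(l):
--     valleys = 0
--     i = 1
--     while i < len(l)-1:
--         if l[i-1] > l[i] < l[i+1]:
--             valleys+=1
--         i+=1
--     return valleys
-- ===== SOURCE B (Python) =====
-- def valley2(l):
--     d = [b - a for a, b in zip(l, l[1:])]
--     return len([1 for x, y in zip(d, d[1:]) if x < 0 and y > 0])
-- ===== Notes on version B (the rewrite author's own statement) =====
-- stated objective: alternative
-- what changed: B builds the list of consecutive differences once and counts sign transitions (negative diff followed by positive diff) over pairs of adjacent diffs, instead of A's index-based while loop comparing three raw elements in place.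
import Mathlib
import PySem

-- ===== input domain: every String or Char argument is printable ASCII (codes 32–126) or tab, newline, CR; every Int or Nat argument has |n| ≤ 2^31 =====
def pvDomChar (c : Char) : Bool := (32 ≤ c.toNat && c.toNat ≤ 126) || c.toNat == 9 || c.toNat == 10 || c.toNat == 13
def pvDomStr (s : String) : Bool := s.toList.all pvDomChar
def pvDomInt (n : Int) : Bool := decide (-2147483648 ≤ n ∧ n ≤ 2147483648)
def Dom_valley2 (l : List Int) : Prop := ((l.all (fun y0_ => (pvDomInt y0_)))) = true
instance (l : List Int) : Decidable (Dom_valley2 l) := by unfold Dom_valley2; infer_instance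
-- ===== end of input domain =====

-- B counts valleys as sign transitions of the list of consecutive differences instead of A's indexed while loop; alternative decomposition, same O(n) cost.


-- ===== PORT A =====
-- the while loop, as recursion on i; l[i-1], l[i], l[i+1] are always in range here
def valley2Go (l : List Int) (valleys i : Int) : Int :=
  if i < (l.length : Int) - 1 then
    valley2Go l
      (if PySem.List.pyGetD l (i-1) 0 > PySem.List.pyGetD l i 0 ∧
          PySem.List.pyGetD l i 0 < PySem.List.pyGetD l (i+1) 0
       then valleys + 1 else valleys)
      (i + 1)
  else valleys
termination_by ((l.length : Int) - 1 - i).toNat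
decreasing_by omega

def valley2 (l : List Int) : Int := valley2Go l 0 1

-- ===== PORT B =====
def valley2_alt (l : List Int) : Int :=
  let d := List.zipWith (fun a b => b - a) l (l.drop 1)
  (((List.zip d (d.drop 1)).filter (fun p => decide (p.1 < 0) && decide (p.2 > 0))).length : Int)

-- ===== PRECONDITION & SPEC =====
def Spec_valley2 (l : List Int) (out : Int) : Prop := out = valley2_alt l
instance (l : List Int) (out : Int) : Decidable (Spec_valley2 l out) := by unfold Spec_valley2; infer_instance

-- ===== CLAIM (what is proved, stated in full; the proofs are below) =====
def Claim_equal_valley2 : Prop := ∀ (l : List Int), Dom_valley2 l → Spec_valley2 l (valley2 l)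

-- ===== LEMMAS AND PROOFS =====

-- common characterisation: structural count of valleys over triples
def count3 : List Int → Int
  | a :: b :: c :: t => (if a > b ∧ b < c then 1 else 0) + count3 (b :: c :: t)
  | _ => 0

lemma alt_eq_count3 : ∀ l : List Int, valley2_alt l = count3 l
  | [] => by simp [valley2_alt, count3]
  | [a] => by simp [valley2_alt, count3]
  | [a, b] => by simp [valley2_alt, count3]
  | a :: b :: c :: t => by
      have ih := alt_eq_count3 (b :: c :: t)
      simp only [valley2_alt, count3] at *
      simp only [List.drop_one, List.zipWith_cons_cons, List.tail_cons, List.zip_cons_cons,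
        List.filter_cons] at *
      by_cases h : a > b ∧ b < c
      · have h1 : b - a < 0 := by omega
        have h2 : c - b > 0 := by omega
        simp [h, h1, ih]; omega
      · simp [h, ih]

lemma count3_drop (l : List Int) (k : Nat) (hk : k + 2 < l.length) :
    count3 (l.drop k) =
      (if l[k] > l[k+1] ∧ l[k+1] < l[k+2] then 1 else 0)
      + count3 (l.drop (k+1)) := by
  have h0 : k < l.length := by omega
  have h1 : k + 1 < l.length := by omega
  have e0 : l.drop k = l[k] :: l.drop (k+1) := List.drop_eq_getElem_cons h0
  have e1 : l.drop (k+1) = l[k+1] :: l.drop (k+2) := List.drop_eq_getElem_cons h1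
  have e2 : l.drop (k+2) = l[k+2] :: l.drop (k+3) := List.drop_eq_getElem_cons hk
  rw [e0, e1, e2]
  simp [count3, ← e2]

lemma go_eq (l : List Int) (i : Int) (h1 : 1 ≤ i) :
    ∀ v, valley2Go l v i = v + count3 (l.drop (i-1).toNat) := by
  by_cases hlt : i < (l.length : Int) - 1
  · intro v
    rw [valley2Go]
    simp only [hlt, if_pos]
    rw [go_eq l (i+1) (by omega)]
    set k := (i-1).toNat with hkdef
    have hi : i = (k : Int) + 1 := by omega
    have hk2 : k + 2 < l.length := by omega
    have g1 : PySem.List.pyGetD l (i-1) 0 = l[k]'(by omega) := by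
      rw [PySem.List.pyGetD_eq_getElem l 0 (by omega) (by omega)]
    have g2 : PySem.List.pyGetD l i 0 = l[k+1]'(by omega) := by
      rw [PySem.List.pyGetD_eq_getElem l 0 (by omega) (by omega)]
      simp only [show i.toNat = k+1 from by omega]
    have g3 : PySem.List.pyGetD l (i+1) 0 = l[k+2]'(by omega) := by
      rw [PySem.List.pyGetD_eq_getElem l 0 (by omega) (by omega)]
      simp only [show (i+1).toNat = k+2 from by omega]
    have hdrop : (i + 1 - 1).toNat = k + 1 := by omega
    rw [hdrop, g1, g2, g3, count3_drop l k hk2]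
    split_ifs <;> ring
  · intro v
    rw [valley2Go]
    simp only [hlt, if_neg, not_false_iff]
    have : count3 (l.drop (i-1).toNat) = 0 := by
      have hlen : l.length ≤ (i-1).toNat + 2 := by omega
      have := List.length_drop (l := l) (i := (i-1).toNat)
      match h : l.drop (i-1).toNat with
      | [] => simp [count3]
      | [a] => simp [count3]
      | [a, b] => simp [count3]
      | a :: b :: c :: t =>
        exfalso
        have := congrArg List.length h
        simp at this
        omega
    omega
termination_by ((l.length : Int) - 1 - i).toNat
decreasing_by omega

-- ===== VERDICT (by name: the statement is the Claim_ definition above) =====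
theorem valley2_spec : Claim_equal_valley2 := by
  intro l _
  show valley2 l = valley2_alt l
  rw [valley2, go_eq l 1 le_rfl 0, alt_eq_count3]
  simp
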